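-- pv_equiv track=rewrite | github.com/dirtysalt/codes | leetcode/maximum-total-importance-of-roads.py | maximumImportance
-- ===== SOURCE A (Python) =====
-- from typing import List
--
-- def maximumImportance(n: int, roads: List[List[int]]) -> int:
--     ind = [0] * n
--
--     for a, b in roads:
--         ind[a] += 1
--         ind[b] += 1
--
--     ind.sort()
--
--     ans = 0
--     for i in range(n):
--         ans += ind[i] * (i + 1)
--     return ans
-- ===== SOURCE B (Python) =====
-- def maximumImportance(n, roads):
--     # Same degree accumulation, but no comparison sort of the n-element degree
--     # array: bucket the degree values in a frequency table and add each bucket's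
--     # contribution with an arithmetic-series formula.
--     ind = [0] * n
--     for a, b in roads:
--         ind[a] += 1
--         ind[b] += 1
--     freq = {}
--     for d in ind:
--         freq[d] = freq.get(d, 0) + 1
--     ans = 0
--     p = 0
--     for d in sorted(freq):
--         c = freq[d]
--         ans += d * (c * p + c * (c + 1) // 2)
--         p += c
--     return ans
-- ===== Notes on version B (the rewrite author's own statement) =====
-- stated objective: alternative
-- what changed: Keeps the degree-accumulation loop but replaces the comparison sort of the whole n-element degree array plus the indexed multiply loop by a degree-value frequency table and one bucketed arithmetic-series pass over the sorted distinct degree values.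
import Mathlib
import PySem

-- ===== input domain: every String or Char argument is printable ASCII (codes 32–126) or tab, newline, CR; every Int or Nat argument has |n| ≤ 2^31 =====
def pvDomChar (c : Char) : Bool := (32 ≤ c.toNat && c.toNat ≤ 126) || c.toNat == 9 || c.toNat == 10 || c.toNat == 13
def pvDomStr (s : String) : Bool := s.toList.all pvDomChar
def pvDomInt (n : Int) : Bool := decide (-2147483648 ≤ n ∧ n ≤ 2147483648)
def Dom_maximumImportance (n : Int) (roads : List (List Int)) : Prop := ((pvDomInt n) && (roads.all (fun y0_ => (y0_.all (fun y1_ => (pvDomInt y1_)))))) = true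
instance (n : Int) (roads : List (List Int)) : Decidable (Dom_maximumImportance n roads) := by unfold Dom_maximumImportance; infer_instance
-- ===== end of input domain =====

-- B replaces A's sort of the whole n-element degree array by a degree-frequency
-- table and a bucketed arithmetic-series pass over the sorted distinct degrees
-- (objective: alternative algorithm, similar cost).

-- ===== PORT A =====
-- ind[x] += 1  (Python list index semantics: negative x wraps; out of range raises, excluded by Pre_)
def pvBump (ind : List Int) (x : Int) : List Int :=
  PySem.List.pySetD ind x (PySem.List.pyGetD ind x 0 + 1)

def maximumImportance (n : Int) (roads : List (List Int)) : Int :=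
  let ind0 : List Int := PySem.List.pyRepeat [(0 : Int)] n      -- [0] * n
  let ind := roads.foldl (fun ind road =>
      match road with
      | [a, b] => pvBump (pvBump ind a) b
      | _ => ind) ind0      -- a road not of shape [a, b] raises in Python: outside Pre_
  let ind := PySem.List.sorted ind (fun x => x) false
  (PySem.List.pyRange 0 n 1).foldl
    (fun ans i => ans + PySem.List.pyGetD ind i 0 * (i + 1)) 0

-- ===== PORT B =====
def maximumImportance_alt (n : Int) (roads : List (List Int)) : Int :=
  let ind0 : List Int := PySem.List.pyRepeat [(0 : Int)] n      -- [0] * n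
  let ind := roads.foldl (fun ind road =>
      -- 'for a, b in roads': unpacking raises ValueError unless road has exactly 2 items (outside Pre_)
      if road.length = 2 then
        let a := PySem.List.pyGetD road 0 0
        let b := PySem.List.pyGetD road 1 0
        let ind := PySem.List.pySetD ind a (PySem.List.pyGetD ind a 0 + 1)
        PySem.List.pySetD ind b (PySem.List.pyGetD ind b 0 + 1)
      else ind) ind0
  let freq : PySem.Dict Int Int :=
    ind.foldl (fun f d => f.insert d (f.getD d 0 + 1)) PySem.Dict.empty
  let r := (PySem.List.sorted freq.keys (fun x => x) false).foldl
      (fun (s : Int × Int) d =>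
        let c := freq.getD d 0
        (s.1 + d * (c * s.2 + PySem.Int.floordiv (c * (c + 1)) 2), s.2 + c))
      ((0 : Int), (0 : Int))
  r.1

-- ===== PRECONDITION & SPEC =====
-- Pre_ excludes exactly the inputs where A raises: a road not of shape [a, b] (ValueError)
-- or an endpoint outside [-n, n) (IndexError).
def Pre_maximumImportance (n : Int) (roads : List (List Int)) : Prop :=
  ∀ r ∈ roads, r.length = 2 ∧ ∀ x ∈ r, -n ≤ x ∧ x < n
instance (n : Int) (roads : List (List Int)) : Decidable (Pre_maximumImportance n roads) := by
  unfold Pre_maximumImportance; infer_instance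

def pvWitness_maximumImportance : Int × List (List Int) := (3, [[0, 1], [1, 2], [1, 1]])

def Spec_maximumImportance (n : Int) (roads : List (List Int)) (out : Int) : Prop :=
  out = maximumImportance_alt n roads
instance (n : Int) (roads : List (List Int)) (out : Int) : Decidable (Spec_maximumImportance n roads out) := by
  unfold Spec_maximumImportance; infer_instance

-- ===== CLAIM (what is proved, stated in full; the proofs are below) =====
def Claim_equal_maximumImportance : Prop := ∀ (n : Int) (roads : List (List Int)), Dom_maximumImportance n roads → Pre_maximumImportance n roads → Spec_maximumImportance n roads (maximumImportance n roads)

-- ===== LEMMAS AND PROOFS =====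

def pvGauss (c : Nat) : Nat := c * (c + 1) / 2

-- weighted sum  Σ_j s[j] * (off + j + 1)  written over enumerate
def pvW (off : Int) (s : List Int) : Int :=
  ((PySem.List.enumerate s off).map (fun p : Int × Int => p.2 * (p.1 + 1))).sum

lemma pvGauss_succ (c : Nat) : pvGauss (c + 1) = pvGauss c + (c + 1) := by
  obtain ⟨k, hk⟩ : 2 ∣ c * (c + 1) := (Nat.even_mul_succ_self c).two_dvd
  have h2 : (c + 1) * (c + 1 + 1) = c * (c + 1) + 2 * (c + 1) := by ring
  unfold pvGauss; omega

lemma pvW_append (off : Int) (s t : List Int) :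
    pvW off (s ++ t) = pvW off s + pvW (off + s.length) t := by
  simp [pvW, PySem.List.enumerate_append]

lemma pvW_replicate (c : Nat) (off d : Int) :
    pvW off (List.replicate c d) = d * ((c : Int) * off + (pvGauss c : Int)) := by
  induction c generalizing off with
  | zero => simp [pvW, pvGauss]
  | succ c ih =>
    rw [List.replicate_succ]
    simp only [pvW, PySem.List.enumerate_cons, List.map_cons, List.sum_cons]
    rw [show ((PySem.List.enumerate (List.replicate c d) (off+1)).map
      (fun p : Int × Int => p.2 * (p.1 + 1))).sum = pvW (off+1) (List.replicate c d) from rfl, ih,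
      pvGauss_succ]
    push_cast
    ring

lemma pvFloordiv_gauss (c : Nat) :
    PySem.Int.floordiv ((c : Int) * ((c : Int) + 1)) 2 = ((pvGauss c : Nat) : Int) := by
  have h : ((c : Int) * ((c : Int) + 1)) = ((c * (c + 1) : Nat) : Int) := by push_cast; ring
  rw [h, show (2 : Int) = ((2 : Nat) : Int) from rfl, PySem.Int.floordiv_natCast]
  rfl

-- the two transliterations of the degree-accumulation loop body agree on every road
lemma pvStep_eq (ind : List Int) (road : List Int) :
    (match road with
      | [a, b] => pvBump (pvBump ind a) b
      | _ => ind)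
    = (if road.length = 2 then
        let a := PySem.List.pyGetD road 0 0
        let b := PySem.List.pyGetD road 1 0
        let ind := PySem.List.pySetD ind a (PySem.List.pyGetD ind a 0 + 1)
        PySem.List.pySetD ind b (PySem.List.pyGetD ind b 0 + 1)
      else ind) := by
  match road with
  | [] => rfl
  | [_] => rfl
  | [a, b] => rfl
  | _ :: _ :: _ :: _ =>
    rw [if_neg (by simp)]

lemma pvFold_length (roads : List (List Int)) (ind : List Int) :
    (roads.foldl (fun ind road =>
      match road with
      | [a, b] => pvBump (pvBump ind a) b
      | _ => ind) ind).length = ind.length := by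
  induction roads generalizing ind with
  | nil => rfl
  | cons r rs ih =>
    rw [List.foldl_cons, ih]
    match r with
    | [] => rfl
    | [_] => rfl
    | [a, b] => simp [pvBump, PySem.List.length_pySetD]
    | _ :: _ :: _ :: _ => rfl

lemma pvA_sum (n : Int) (s : List Int) (hn : (s.length : Int) = n) :
    (PySem.List.pyRange 0 n 1).foldl
      (fun ans i => ans + PySem.List.pyGetD s i 0 * (i + 1)) 0 = pvW 0 s := by
  subst hn
  have he := PySem.List.enumerate_eq_map_pyRange (xs := s) (d := (0 : Int))
  rw [pvW, he, List.map_map, PySem.List.len_eq]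
  rw [PySem.List.foldl_add (l := PySem.List.pyRange 0 (s.length : Int) 1)
    (g := fun i => PySem.List.pyGetD s i 0 * (i + 1)) (a := 0)]
  simp only [Function.comp_def, zero_add]

-- splitting off the maximal value group of a sorted list
lemma pvSorted_split (S : List Int) (d : Int) (hmax : ∀ x ∈ S, x ≤ d) :
    PySem.List.sorted S (fun x => x) false
      = PySem.List.sorted (S.filter (· ≠ d)) (fun x => x) false
        ++ List.replicate (S.count d) d := by
  have h2 : List.filter (fun x => x == d) S = List.replicate (S.count d) d :=
    List.filter_beq d
  have h1 := PySem.List.sorted_perm (S.filter (· ≠ d)) (fun x : Int => x) false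
  have hperm2 : (PySem.List.sorted (S.filter (· ≠ d)) (fun x => x) false
        ++ List.replicate (S.count d) d).Perm S := by
    rw [← h2]
    exact (h1.append_right _).trans (by simpa using List.filter_append_perm (fun x => x ≠ d) S)
  refine PySem.List.eq_of_perm_of_pairwise_le_of_injective (fun x : Int => x)
    (fun a b h => h) ((PySem.List.sorted_perm S _ false).trans hperm2.symm)
    (PySem.List.sorted_pairwise S _) ?_
  rw [List.pairwise_append]
  refine ⟨PySem.List.sorted_pairwise _ _, List.pairwise_replicate.mpr (by simp), ?_⟩
  intro x hx y hy
  have hxS : x ∈ S.filter (· ≠ d) := (PySem.List.mem_sorted _ _ _ x).mp hx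
  have := hmax x (List.mem_of_mem_filter hxS)
  have hyd : y = d := List.eq_of_mem_replicate hy
  simpa [hyd] using this

-- the bucketed arithmetic-series loop computes the weighted sum of the sorted list
lemma pvBucket (K : List Int) (c : Int → Nat) :
    ∀ (S : List Int) (a p : Int), K.Pairwise (· < ·) → (∀ x, x ∈ K ↔ x ∈ S) →
    (∀ d ∈ K, c d = S.count d) →
    K.foldl (fun (s : Int × Int) d =>
        (s.1 + d * ((c d : Int) * s.2 + ((pvGauss (c d) : Nat) : Int)), s.2 + (c d : Int)))
      (a, p)
      = (a + pvW p (PySem.List.sorted S (fun x => x) false), p + S.length) := by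
  induction K using List.reverseRecOn with
  | nil =>
    intro S a p _ hmem _
    have hS : S = [] := List.eq_nil_iff_forall_not_mem.mpr
      (fun x hx => List.not_mem_nil ((hmem x).mpr hx))
    subst hS
    rw [show PySem.List.sorted ([] : List Int) (fun x => x) false = [] from rfl]
    simp [pvW]
  | append_singleton K' d ih =>
    intro S a p hpw hmem hc
    have hd : d ∈ K' ++ [d] := List.mem_append_right _ (List.mem_singleton_self d)
    have hlt : ∀ x ∈ K', x < d := by
      intro x hx
      exact (List.pairwise_append.mp hpw).2.2 x hx d (List.mem_singleton_self d)
    have hmax : ∀ x ∈ S, x ≤ d := by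
      intro x hx
      rcases List.mem_append.mp ((hmem x).mpr hx) with h | h
      · exact le_of_lt (hlt x h)
      · simp_all
    set S' := S.filter (· ≠ d) with hS'
    have hmem' : ∀ x, x ∈ K' ↔ x ∈ S' := by
      intro x
      constructor
      · intro hx
        have hne : x ≠ d := ne_of_lt (hlt x hx)
        exact List.mem_filter.mpr ⟨(hmem x).mp (List.mem_append_left _ hx), by simp [hne]⟩
      · intro hx
        obtain ⟨hxS, hne⟩ := List.mem_filter.mp hx
        have hne' : x ≠ d := by simpa using hne
        rcases List.mem_append.mp ((hmem x).mpr hxS) with h | h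
        · exact h
        · simp_all
    have hc' : ∀ e ∈ K', c e = S'.count e := by
      intro e he
      rw [hc e (List.mem_append_left _ he), hS']
      rw [List.count_filter (by simp [ne_of_lt (hlt e he)])]
    have hsplit := pvSorted_split S d hmax
    rw [← hS'] at hsplit
    have hcount : List.filter (fun x => x == d) S = List.replicate (S.count d) d :=
      List.filter_beq d
    have hlen : S.length = S'.length + S.count d := by
      have := List.filter_append_perm (fun x => x ≠ d) S
      have hl := this.length_eq
      simp only [List.length_append] at hl
      rw [← hl, hS']
      congr 1
      rw [show (fun x : Int => !decide (x ≠ d)) = (fun x => x == d) by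
        funext x; by_cases h : x = d <;> simp [h], hcount, List.length_replicate]
    rw [List.foldl_append, ih S' a p (List.pairwise_append.mp hpw).1 hmem' hc']
    simp only [List.foldl_cons, List.foldl_nil]
    rw [hsplit, pvW_append, pvW_replicate, hc d hd]
    have hslen : (PySem.List.sorted S' (fun x : Int => x) false).length = S'.length :=
      (PySem.List.sorted_perm S' _ false).length_eq
    rw [hslen]
    refine Prod.ext ?_ ?_
    · simp only
      ring
    · simp only
      omega

-- ===== VERDICT (by name: the statement is the Claim_ definition above) =====
theorem maximumImportance_spec : Claim_equal_maximumImportance := by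
  intro n roads _hdom _hpre
  unfold Spec_maximumImportance
  simp only [maximumImportance, maximumImportance_alt]
  -- the two degree-accumulation loops compute the same list
  rw [← PySem.List.foldl_congr_mem roads _ _ (PySem.List.pyRepeat [(0 : Int)] n)
    (fun ind road _ => pvStep_eq ind road)]
  set I : List Int := roads.foldl (fun ind road =>
      match road with
      | [a, b] => pvBump (pvBump ind a) b
      | _ => ind) (PySem.List.pyRepeat [(0 : Int)] n) with hI
  have hIlen : I.length = n.toNat := by
    rw [hI, pvFold_length]
    rw [PySem.List.pyRepeat_singleton, List.length_replicate]
  by_cases hn : 0 ≤ n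
  · -- A's range loop is the weighted sum of the sorted degree list
    rw [pvA_sum n (PySem.List.sorted I (fun x => x) false)
      (by rw [(PySem.List.sorted_perm I _ false).length_eq, hIlen]; omega)]
    -- B's second loop builds Counter(I)
    rw [PySem.Dict.foldl_insert_getD_add_one_eq_counter]
    set K := PySem.List.sorted (PySem.Dict.counter I).keys (fun x => x) false with hK
    have hKpw : K.Pairwise (· < ·) := by
      rw [hK, PySem.Dict.keys_counter]
      exact PySem.List.sorted_ofList_pairwise_lt I
    have hKmem : ∀ x, x ∈ K ↔ x ∈ I := by
      intro x
      rw [hK, PySem.List.mem_sorted, PySem.Dict.keys_counter]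
      exact PySem.Set.mem_ofList I x
    have hstep : ∀ (acc : Int × Int) (d : Int), d ∈ K →
        (acc.1 + d * ((PySem.Dict.counter I).getD d 0 * acc.2
            + PySem.Int.floordiv ((PySem.Dict.counter I).getD d 0
                * ((PySem.Dict.counter I).getD d 0 + 1)) 2),
          acc.2 + (PySem.Dict.counter I).getD d 0)
        = (acc.1 + d * (((I.count d : Nat) : Int) * acc.2 + ((pvGauss (I.count d) : Nat) : Int)),
          acc.2 + ((I.count d : Nat) : Int)) := by
      intro acc d _
      rw [PySem.Dict.getD_counter, pvFloordiv_gauss]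
    rw [PySem.List.foldl_congr_mem _ _ _ _ hstep,
      pvBucket K (fun d => I.count d) I 0 0 hKpw hKmem (fun d _ => rfl)]
    simp
  · -- n < 0: [0] * n is empty, both sides are 0
    have hI0 : I = [] := List.eq_nil_of_length_eq_zero (by omega)
    rw [hI0, PySem.List.pyRange_one_eq_nil (by omega)]
    rfl
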